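-- pv_equiv track=rewrite | github.com/devinhunsberger/Black-Jack-Card-Counter | main.py | HiLo
-- ===== SOURCE A (Python) =====
-- def HiLo(count, board):
--     subCount = ['2', '3', '4', '5', '6']
--     addCount = ['10', 'Jack', 'Queen', 'King', 'Ace']
--     neutralCount = ['7', '8', '9']
--     subCnt = 1
--     addCnt = 1
--     for i in board:
--         if i in neutralCount:
--             pass
--         else:
--             if i in subCount:
--                 count -= subCnt
--             else:
--                 count += addCnt
--     return count
-- ===== SOURCE B (Python) =====
-- def HiLo(count, board):
--     sub = sum(1 for c in board if c in ('2', '3', '4', '5', '6'))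
--     neutral = sum(1 for c in board if c in ('7', '8', '9'))
--     return count + len(board) - neutral - 2 * sub
-- ===== Notes on version B (the rewrite author's own statement) =====
-- stated objective: simpler
-- what changed: Replaces the per-card branch-and-accumulate loop with two aggregate tallies (low and neutral cards) and one closed-form arithmetic expression count + len(board) - neutral - 2*sub.
import Mathlib
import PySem

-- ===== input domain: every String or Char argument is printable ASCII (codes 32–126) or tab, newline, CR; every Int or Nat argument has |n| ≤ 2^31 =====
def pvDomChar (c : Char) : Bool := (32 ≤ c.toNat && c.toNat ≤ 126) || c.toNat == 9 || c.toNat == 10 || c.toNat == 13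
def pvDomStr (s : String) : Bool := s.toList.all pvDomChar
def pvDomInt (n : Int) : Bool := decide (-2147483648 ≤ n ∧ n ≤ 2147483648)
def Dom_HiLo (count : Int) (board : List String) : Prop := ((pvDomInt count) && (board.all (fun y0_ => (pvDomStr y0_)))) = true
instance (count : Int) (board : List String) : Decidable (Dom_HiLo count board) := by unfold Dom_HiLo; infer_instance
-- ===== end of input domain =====

-- B replaces A's per-card branch loop by two aggregate tallies and one arithmetic expression (objective: simpler).


-- ===== PORT A =====
def HiLo (count : Int) (board : List String) : Int :=
  let subCount : List String := ["2", "3", "4", "5", "6"]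
  let _addCount : List String := ["10", "Jack", "Queen", "King", "Ace"]
  let neutralCount : List String := ["7", "8", "9"]
  let subCnt : Int := 1
  let addCnt : Int := 1
  board.foldl (fun count i =>
    if i ∈ neutralCount then count
    else if i ∈ subCount then count - subCnt
    else count + addCnt) count

-- ===== PORT B =====
def HiLo_alt (count : Int) (board : List String) : Int :=
  let sub : Int := (board.filter (fun c => c ∈ ["2", "3", "4", "5", "6"])).length
  let neutral : Int := (board.filter (fun c => c ∈ ["7", "8", "9"])).length
  count + board.length - neutral - 2 * sub

-- ===== PRECONDITION & SPEC =====
def Spec_HiLo (count : Int) (board : List String) (out : Int) : Prop := out = HiLo_alt count board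
instance (count : Int) (board : List String) (out : Int) : Decidable (Spec_HiLo count board out) := by unfold Spec_HiLo; infer_instance

-- ===== CLAIM (what is proved, stated in full; the proofs are below) =====
def Claim_equal_HiLo : Prop := ∀ (count : Int) (board : List String), Dom_HiLo count board → Spec_HiLo count board (HiLo count board)

-- ===== LEMMAS AND PROOFS =====
theorem HiLo_eq_alt (count : Int) (board : List String) : HiLo count board = HiLo_alt count board := by
  induction board generalizing count with
  | nil => simp [HiLo, HiLo_alt]
  | cons h t ih =>
    simp only [HiLo, HiLo_alt] at ih ⊢
    simp only [List.foldl_cons, List.filter_cons, List.length_cons]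
    by_cases hn : h ∈ (["7", "8", "9"] : List String)
    · have hs : h ∉ (["2", "3", "4", "5", "6"] : List String) := by
        simp only [List.mem_cons, List.not_mem_nil, or_false] at hn
        rcases hn with rfl | rfl | rfl <;> simp
      rw [if_pos hn, ih count]
      simp [hs, hn]
      omega
    · by_cases hs : h ∈ (["2", "3", "4", "5", "6"] : List String)
      · rw [if_neg hn, if_pos hs, ih (count - 1)]
        simp [hs, hn]
        omega
      · rw [if_neg hn, if_neg hs, ih (count + 1)]
        simp [hs, hn]
        omega

-- ===== VERDICT (by name: the statement is the Claim_ definition above) =====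
theorem HiLo_spec : Claim_equal_HiLo := by
  intro count board _
  exact HiLo_eq_alt count board
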